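-- pv_equiv track=rewrite | github.com/MLDMXM2017/ECOC_TLK | ECOC_library/Common/Read_Write_tool.py | form_style
-- ===== SOURCE A (Python) =====
-- def form_style(arr):
--     styles = []
--     min_v = min(arr)
--     max_v = max(arr)
--     for i in range(len(arr)):
--         if arr[i] == max_v:
--             styles.append('font: bold 1, color red;')
--         elif arr[i] == min_v:
--             styles.append('font: bold 1, color blue;')
--         else:
--             styles.append('font: bold 0, color black;')
--     return styles
-- ===== SOURCE B (Python) =====
-- def form_style(arr):
--     min_v = min(arr)
--     max_v = max(arr)
--     styles = ['font: bold 0, color black;'] * len(arr)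
--     styles = ['font: bold 1, color blue;' if a == min_v else s for a, s in zip(arr, styles)]
--     styles = ['font: bold 1, color red;' if a == max_v else s for a, s in zip(arr, styles)]
--     return styles
-- ===== Notes on version B (the rewrite author's own statement) =====
-- stated objective: alternative
-- what changed: Replaces the single index loop with a three-branch if per element by a default-filled list followed by two pointwise override passes (blue at minima, then red at maxima, so all-equal arrays come out red as in A), written as zip comprehensions instead of an index loop.
import Mathlib
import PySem

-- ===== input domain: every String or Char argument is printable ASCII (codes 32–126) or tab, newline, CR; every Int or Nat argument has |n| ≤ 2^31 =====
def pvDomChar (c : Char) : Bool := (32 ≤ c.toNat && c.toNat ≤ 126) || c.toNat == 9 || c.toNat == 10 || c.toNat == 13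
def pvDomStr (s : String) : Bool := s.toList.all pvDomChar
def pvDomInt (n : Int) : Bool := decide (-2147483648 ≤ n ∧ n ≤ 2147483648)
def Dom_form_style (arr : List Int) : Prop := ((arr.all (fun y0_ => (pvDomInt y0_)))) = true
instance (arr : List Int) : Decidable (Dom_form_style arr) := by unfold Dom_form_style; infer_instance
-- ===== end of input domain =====

-- B replaces A's single three-branch index loop by a default-filled list with two pointwise
-- override passes (blue at minima, then red at maxima); objective: alternative decomposition.

-- ===== PORT A =====
def form_style (arr : List Int) : List String :=
  match PySem.List.min? arr (fun x => x), PySem.List.max? arr (fun x => x) with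
  | some min_v, some max_v =>
      (PySem.List.pyRange 0 (arr.length : Int) 1).foldl
        (fun styles i =>
          let v := PySem.List.pyGetD arr i 0
          if v = max_v then styles ++ ["font: bold 1, color red;"]
          else if v = min_v then styles ++ ["font: bold 1, color blue;"]
          else styles ++ ["font: bold 0, color black;"]) []
  | _, _ => []   -- unreachable under Pre_ (min/max raise ValueError on [])

-- ===== PORT B =====
def form_style_alt (arr : List Int) : List String :=
  let mnO := PySem.List.min? arr (fun x => x)
  let mxO := PySem.List.max? arr (fun x => x)
  if mnO.isNone || mxO.isNone then []   -- unreachable under Pre_ (min/max raise on [])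
  else
    let min_v := mnO.getD 0
    let max_v := mxO.getD 0
    let styles := List.replicate arr.length "font: bold 0, color black;"
    let styles := (arr.zip styles).map
      (fun p => if p.1 = min_v then "font: bold 1, color blue;" else p.2)
    (arr.zip styles).map
      (fun p => if p.1 = max_v then "font: bold 1, color red;" else p.2)

-- ===== PRECONDITION & SPEC =====
-- A raises ValueError (min of empty sequence) on []; excluded.
def Pre_form_style (arr : List Int) : Prop := arr ≠ []
instance (arr : List Int) : Decidable (Pre_form_style arr) := by unfold Pre_form_style; infer_instance
def pvWitness_form_style : List Int := [1, 3, 2]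

def Spec_form_style (arr : List Int) (out : List String) : Prop := out = form_style_alt arr
instance (arr : List Int) (out : List String) : Decidable (Spec_form_style arr out) := by unfold Spec_form_style; infer_instance

-- ===== CLAIM (what is proved, stated in full; the proofs are below) =====
def Claim_equal_form_style : Prop := ∀ (arr : List Int), Dom_form_style arr → Pre_form_style arr → Spec_form_style arr (form_style arr)

-- ===== LEMMAS AND PROOFS =====

-- second-pass shape: mapping over xs zipped with a pointwise function of xs
theorem pv_zip_map_self {α β γ : Type} (xs : List α) (f : α → β) (g : α × β → γ) :
    ((xs.zip (xs.map f)).map g) = xs.map (fun a => g (a, f a)) := by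
  induction xs with
  | nil => rfl
  | cons a t ih => simp only [List.map_cons, List.zip]; simpa [List.zip] using ih

theorem pv_A_eq (arr : List Int) (mn mx : Int) :
    (PySem.List.pyRange 0 (arr.length : Int) 1).foldl
        (fun styles i =>
          let v := PySem.List.pyGetD arr i 0
          if v = mx then styles ++ ["font: bold 1, color red;"]
          else if v = mn then styles ++ ["font: bold 1, color blue;"]
          else styles ++ ["font: bold 0, color black;"]) []
      = arr.map (fun v =>
          if v = mx then "font: bold 1, color red;"
          else if v = mn then "font: bold 1, color blue;"
          else "font: bold 0, color black;") := by
  rw [PySem.List.foldl_pyRange_zero_pyGetD' arr 0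
      (fun styles v =>
        if v = mx then styles ++ ["font: bold 1, color red;"]
        else if v = mn then styles ++ ["font: bold 1, color blue;"]
        else styles ++ ["font: bold 0, color black;"]) []]
  rw [show (fun (styles : List String) (v : Int) =>
        if v = mx then styles ++ ["font: bold 1, color red;"]
        else if v = mn then styles ++ ["font: bold 1, color blue;"]
        else styles ++ ["font: bold 0, color black;"])
      = (fun styles v => styles ++ [if v = mx then "font: bold 1, color red;"
        else if v = mn then "font: bold 1, color blue;"
        else "font: bold 0, color black;"]) from by
    funext s v; split_ifs <;> rfl]
  simpa using PySem.List.foldl_append_singleton_eq_map (l := arr)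
    (f := fun v => if v = mx then "font: bold 1, color red;"
      else if v = mn then "font: bold 1, color blue;" else "font: bold 0, color black;") []

theorem pv_B_eq (arr : List Int) (mn mx : Int) :
    (let styles := List.replicate arr.length "font: bold 0, color black;"
     let styles := (arr.zip styles).map
        (fun p => if p.1 = mn then "font: bold 1, color blue;" else p.2)
     (arr.zip styles).map
        (fun p => if p.1 = mx then "font: bold 1, color red;" else p.2))
      = arr.map (fun v =>
          if v = mx then "font: bold 1, color red;"
          else if v = mn then "font: bold 1, color blue;"
          else "font: bold 0, color black;") := by
  have hrep : List.replicate arr.length ("font: bold 0, color black;")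
      = arr.map (fun _ => "font: bold 0, color black;") := Eq.symm List.map_const'
  simp only [hrep, pv_zip_map_self]

-- ===== VERDICT (by name: the statement is the Claim_ definition above) =====
theorem form_style_spec : Claim_equal_form_style := by
  intro arr _ hpre
  unfold Spec_form_style form_style form_style_alt
  rcases hmn : PySem.List.min? arr (fun x => x) with _ | mn
  · exact absurd ((PySem.List.min?_eq_none_iff arr (fun x => x)).mp hmn) hpre
  rcases hmx : PySem.List.max? arr (fun x => x) with _ | mx
  · exact absurd ((PySem.List.max?_eq_none_iff arr (fun x => x)).mp hmx) hpre
  simp only [Option.isNone_some, Bool.or_self, Bool.false_eq_true, if_false, Option.getD_some]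
  rw [pv_A_eq arr mn mx]
  exact (pv_B_eq arr mn mx).symm
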